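-- pv_equiv track=rewrite | github.com/Arijeet2302/Leetcode | leetcode_1009.py | complement_binary
-- ===== SOURCE A (Python) =====
-- def complement_binary(n):
--     n=str(decimal(n))
--     s=""
--     for i in n:
--         if i == '1':
--             s+='0'
--         else:
--             s+='1'
--     result=binary(int(s))
--     return result
--
-- def binary(num):
--     result=0
--     i=0
--     while num!=0:
--         r=num%10
--         result+=r*2**i
--         i+=1
--         num=num//10
--     return result
--
-- def decimal(num):
--     result=0
--     i=0
--     while num!=0:
--         r=num%2
--         result+=r*10**i
--         num=num//2
--         i+=1
--     return result
-- ===== SOURCE B (Python) =====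
-- def complement_binary(n):
--     if n == 0:
--         return 1
--     return ((1 << n.bit_length()) - 1) ^ n
-- ===== Notes on version B (the rewrite author's own statement) =====
-- stated objective: simpler
-- what changed: Replaces the decimal()/binary() digit-conversion loops and the character-flip pass by a single XOR of n against the all-ones mask of width n.bit_length(), keeping the zero case (whose result is the correct complement of a one-digit binary string).
import Mathlib
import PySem

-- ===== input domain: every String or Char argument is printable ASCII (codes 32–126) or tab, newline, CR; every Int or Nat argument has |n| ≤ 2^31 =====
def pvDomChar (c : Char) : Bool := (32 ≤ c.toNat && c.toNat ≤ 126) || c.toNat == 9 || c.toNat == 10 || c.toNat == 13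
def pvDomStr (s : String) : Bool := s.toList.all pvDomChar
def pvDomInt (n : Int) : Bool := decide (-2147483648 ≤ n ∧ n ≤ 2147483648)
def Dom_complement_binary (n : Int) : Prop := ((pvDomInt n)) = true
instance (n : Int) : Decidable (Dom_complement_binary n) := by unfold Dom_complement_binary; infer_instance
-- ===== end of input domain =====

-- B replaces A's decimal()/binary() digit loops and the string flip by one XOR of n against the
-- all-ones mask of width n.bit_length() (objective: simpler; the zero branch returns the correct
-- complement of a one-digit binary string).

-- ===== PORT A =====

-- decimal(num): while num != 0: r = num%2; result += r*10**i; num //= 2; i += 1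
-- (for num < 0 the Python loop never terminates — those inputs are outside Pre_;
--  the `num < 0 → result` branch only makes the recursion total, it is never reached on Pre_)
def pyDecimalLoop (num result : Int) (i : Nat) : Int :=
  if num = 0 then result
  else if num < 0 then result
  else pyDecimalLoop (PySem.Int.floordiv num 2) (result + PySem.Int.mod num 2 * 10 ^ i) (i + 1)
termination_by num.toNat
decreasing_by
  rw [PySem.Int.floordiv_eq_ediv_of_pos (by norm_num)]
  omega

def pyDecimal (num : Int) : Int := pyDecimalLoop num 0 0

-- binary(num): while num != 0: r = num%10; result += r*2**i; i += 1; num //= 10  (same remark)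
def pyBinaryLoop (num result : Int) (i : Nat) : Int :=
  if num = 0 then result
  else if num < 0 then result
  else pyBinaryLoop (PySem.Int.floordiv num 10) (result + PySem.Int.mod num 10 * 2 ^ i) (i + 1)
termination_by num.toNat
decreasing_by
  rw [PySem.Int.floordiv_eq_ediv_of_pos (by norm_num)]
  omega

def pyBinary (num : Int) : Int := pyBinaryLoop num 0 0

-- hand port of int(s): the s built below is always a NONEMPTY list of decimal digit characters
-- (each '0' or '1'; no sign, space or underscore), and on exactly those strings Python's int(s)
-- is this left fold accumulating 10*acc + digit value.
def pyIntOfDigits (cs : List Char) : Int :=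
  cs.foldl (fun a c => 10 * a + ((c.toNat : Int) - 48)) 0

def complement_binary (n : Int) : Int :=
  -- n = str(decimal(n))
  let nChars := PySem.Int.toChars (pyDecimal n)
  -- s = ""; for i in n: s += '0' if i == '1' else '1'
  let s := nChars.foldl (fun s c => s ++ [if c = '1' then '0' else '1']) ([] : List Char)
  -- result = binary(int(s)); return result
  pyBinary (pyIntOfDigits s)

-- ===== PORT B =====
def complement_binary_alt (n : Int) : Int :=
  if n = 0 then 1
  else PySem.Int.bxor ((1 <<< PySem.Int.bitLength n) - 1) n

-- ===== PRECONDITION & SPEC =====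
-- Pre_ excludes exactly n < 0, where Python A never returns: decimal()'s `while num != 0` with
-- num //= 2 loops forever on negative num.
def Pre_complement_binary (n : Int) : Prop := 0 ≤ n
instance (n : Int) : Decidable (Pre_complement_binary n) := by unfold Pre_complement_binary; infer_instance
def pvWitness_complement_binary : Int := (5)

def Spec_complement_binary (n : Int) (out : Int) : Prop := out = complement_binary_alt n
instance (n : Int) (out : Int) : Decidable (Spec_complement_binary n out) := by unfold Spec_complement_binary; infer_instance

-- ===== CLAIM (what is proved, stated in full; the proofs are below) =====
def Claim_equal_complement_binary : Prop := ∀ (n : Int), Dom_complement_binary n → Pre_complement_binary n → Spec_complement_binary n (complement_binary n)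

-- ===== LEMMAS AND PROOFS =====

-- the value decimal(m) computes: the binary digits of m read as a decimal numeral
def PD : Nat → Nat := fun m =>
  if m = 0 then 0 else 10 * PD (m / 2) + m % 2
decreasing_by omega

-- the value binary(k) computes: the decimal digits of k read as a binary numeral
def PB : Nat → Int := fun m =>
  if m = 0 then 0 else ((m % 10 : Nat) : Int) + 2 * PB (m / 10)
decreasing_by omega

-- the decimal digit characters of m, most significant first (= Nat.toDigits 10 m)
def rep : Nat → List Char := fun m =>
  if m < 10 then [Nat.digitChar m] else rep (m / 10) ++ [Nat.digitChar (m % 10)]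
decreasing_by omega

-- pyIntOfDigits, seen on the Nat side with an explicit accumulator
def VN : List Char → Nat → Nat := fun cs a => cs.foldl (fun a c => 10 * a + (c.toNat - 48)) a

lemma pyDecimalLoop_eq (m : Nat) : ∀ (res : Int) (i : Nat),
    pyDecimalLoop (m : Int) res i = res + 10 ^ i * (PD m : Int) := by
  induction m using Nat.strong_induction_on with
  | _ m ih =>
    intro res i
    rw [pyDecimalLoop, PD]
    by_cases hm : m = 0
    · simp [hm]
    · rw [if_neg (by exact_mod_cast hm), if_neg (by omega), if_neg hm,
          PySem.Int.floordiv_eq_ediv_of_pos (by norm_num),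
          PySem.Int.mod_eq_emod_of_pos (by norm_num)]
      have h2 : ((m : Int)) / 2 = ((m / 2 : Nat) : Int) := by omega
      have h3 : ((m : Int)) % 2 = ((m % 2 : Nat) : Int) := by omega
      rw [h2, h3, ih (m / 2) (by omega)]
      push_cast
      ring

lemma pyBinaryLoop_eq (m : Nat) : ∀ (res : Int) (i : Nat),
    pyBinaryLoop (m : Int) res i = res + 2 ^ i * PB m := by
  induction m using Nat.strong_induction_on with
  | _ m ih =>
    intro res i
    rw [pyBinaryLoop, PB]
    by_cases hm : m = 0
    · simp [hm]
    · rw [if_neg (by exact_mod_cast hm), if_neg (by omega), if_neg hm,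
          PySem.Int.floordiv_eq_ediv_of_pos (by norm_num),
          PySem.Int.mod_eq_emod_of_pos (by norm_num)]
      have h2 : ((m : Int)) / 10 = ((m / 10 : Nat) : Int) := by omega
      have h3 : ((m : Int)) % 10 = ((m % 10 : Nat) : Int) := by omega
      rw [h2, h3, ih (m / 10) (by omega)]
      push_cast
      ring

lemma toDigitsCore_eq_rep (f : Nat) : ∀ (n : Nat) (ds : List Char), n < 10 ^ (f + 1) →
    Nat.toDigitsCore 10 (f + 1) n ds = rep n ++ ds := by
  induction f with
  | zero =>
    intro n ds h
    rw [Nat.toDigitsCore, rep]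
    have h10 : n < 10 := by omega
    have h0 : n / 10 = 0 := by omega
    simp [h0, h10, Nat.mod_eq_of_lt h10]
  | succ f ih =>
    intro n ds h
    rw [Nat.toDigitsCore, rep]
    by_cases h10 : n < 10
    · have h0 : n / 10 = 0 := by omega
      simp [h0, h10, Nat.mod_eq_of_lt h10]
    · have hne : ¬ n / 10 = 0 := by omega
      rw [if_neg hne, if_neg h10, ih (n / 10) _ (by
        have h1 : 10 * (n / 10) ≤ n := Nat.mul_div_le n 10
        have hp : (10:Nat) ^ (f+1+1) = 10 * 10 ^ (f+1) := by ring
        omega), List.append_assoc]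
      rfl

lemma toChars_eq_rep (m : Nat) : PySem.Int.toChars (m : Int) = rep m := by
  rw [PySem.Int.toChars]
  rw [if_neg (by omega)]
  simp only [Int.toNat_natCast]
  rw [Nat.toDigits]
  exact (toDigitsCore_eq_rep m m [] (by
    have := Nat.lt_pow_self (by norm_num : 1 < 10) (n := m+1)
    omega)).trans (List.append_nil _)

lemma PD_pos (m : Nat) (h : 0 < m) : 0 < PD m := by
  induction m using Nat.strong_induction_on with
  | _ m ih =>
    rw [PD, if_neg (by omega)]
    by_cases h2 : m / 2 = 0
    · have : m % 2 = 1 := by omega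
      omega
    · have := ih (m / 2) (by omega) (by omega)
      omega

lemma rep_PD_step (m : Nat) (h : 2 ≤ m) :
    rep (PD m) = rep (PD (m / 2)) ++ [Nat.digitChar (m % 2)] := by
  have hq : 0 < PD (m / 2) := PD_pos _ (by omega)
  have hPD : PD m = 10 * PD (m / 2) + m % 2 := by rw [PD, if_neg (by omega)]
  rw [hPD, rep, if_neg (by omega)]
  have hd : (10 * PD (m / 2) + m % 2) / 10 = PD (m / 2) := by omega
  have hm : (10 * PD (m / 2) + m % 2) % 10 = m % 2 := by omega
  rw [hd, hm]

lemma pyIntOfDigits_eq_VN (cs : List Char) (hb : ∀ c ∈ cs, c = '0' ∨ c = '1') :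
    pyIntOfDigits cs = (VN cs 0 : Int) := by
  suffices h : ∀ (a : Nat), cs.foldl (fun a c => 10 * a + ((c.toNat : Int) - 48)) (a : Int)
      = (VN cs a : Int) from h 0
  induction cs with
  | nil => intro a; simp [VN]
  | cons c t ih =>
    intro a
    have hc : c = '0' ∨ c = '1' := hb c (by simp)
    have ht : ∀ c ∈ t, c = '0' ∨ c = '1' := fun c hc => hb c (by simp [hc])
    have h48 : ((c.toNat : Int) - 48) = ((c.toNat - 48 : Nat) : Int) := by
      rcases hc with h | h <;> subst h <;> decide
    simp only [VN, List.foldl_cons] at *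
    rw [h48]
    have : (10 * (a : Int) + ((c.toNat - 48 : Nat) : Int)) = ((10 * a + (c.toNat - 48) : Nat) : Int) := by
      push_cast; ring
    rw [this, ih ht]

lemma flip_mem (cs : List Char) :
    ∀ c ∈ cs.map (fun c => if c = '1' then '0' else '1'), c = '0' ∨ c = '1' := by
  intro c hc
  rcases List.mem_map.mp hc with ⟨d, _, hd⟩
  by_cases h1 : d = '1'
  · rw [if_pos h1] at hd; exact Or.inl hd.symm
  · rw [if_neg h1] at hd; exact Or.inr hd.symm

lemma PB_shift (v r : Nat) (hr : r < 10) : PB (10 * v + r) = (r : Int) + 2 * PB v := by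
  by_cases h0 : 10 * v + r = 0
  · have hv : v = 0 := by omega
    have hrr : r = 0 := by omega
    subst hv hrr
    have e : PB 0 = 0 := by rw [PB]; simp
    simp [e]
  · rw [PB, if_neg h0]
    have hd : (10 * v + r) / 10 = v := by omega
    have hm : (10 * v + r) % 10 = r := by omega
    rw [hd, hm]

lemma VN_append (xs : List Char) (c : Char) :
    VN (xs ++ [c]) 0 = 10 * VN xs 0 + (c.toNat - 48) := by
  simp [VN, List.foldl_append]

lemma key (m : Nat) : 0 < m →
    PB (VN ((rep (PD m)).map (fun c => if c = '1' then '0' else '1')) 0)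
      = 2 ^ PySem.Int.bitLength (m : Int) - 1 - (m : Int) := by
  induction m using Nat.strong_induction_on with
  | _ m ih =>
    intro h
    by_cases h1 : m = 1
    · subst h1
      have e0 : PD 0 = 0 := by rw [PD]; simp
      have e1 : PD 1 = 1 := by rw [PD]; norm_num [e0]
      have e2 : rep 1 = ['1'] := by
        rw [rep, if_pos (by norm_num : (1:Nat) < 10)]
        decide
      have e3 : PB 0 = 0 := by rw [PB]; simp
      rw [e1, e2]
      have e5 : List.map (fun c => if c = '1' then '0' else '1') ['1'] = ['0'] := by decide
      rw [e5]
      have e4 : VN ['0'] 0 = 0 := by decide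
      rw [e4, e3]
      decide
    · -- m ≥ 2
      have h2 : 2 ≤ m := by omega
      rw [rep_PD_step m h2, List.map_append, List.map_cons, List.map_nil]
      have hflip : (if Nat.digitChar (m % 2) = '1' then '0' else '1') = Nat.digitChar (1 - m % 2) := by
        have hb : m % 2 < 2 := by omega
        interval_cases h : m % 2 <;> decide
      rw [hflip, VN_append]
      have hch : (Nat.digitChar (1 - m % 2)).toNat - 48 = 1 - m % 2 := by
        have hb : m % 2 < 2 := by omega
        interval_cases h : m % 2 <;> decide
      rw [hch, PB_shift _ _ (by omega), ih (m / 2) (by omega) (by omega),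
          PySem.Int.bitLength_natCast (by omega : 0 < m)]
      have hpow : (2:Int) ^ (PySem.Int.bitLength ((m / 2 : Nat) : Int) + 1)
          = 2 * 2 ^ PySem.Int.bitLength ((m / 2 : Nat) : Int) := by ring
      rw [hpow]
      have hmd : (m : Int) = 2 * ((m / 2 : Nat) : Int) + ((m % 2 : Nat) : Int) := by
        push_cast; omega
      have hcast : ((1 - m % 2 : Nat) : Int) = 1 - ((m % 2 : Nat) : Int) := by
        push_cast [Nat.cast_sub (by omega : m % 2 ≤ 1)]; ring
      rw [hcast]
      omega

lemma mask_xor (L : Nat) : ∀ k : Nat, k < 2 ^ L → (2 ^ L - 1) ^^^ k = 2 ^ L - 1 - k := by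
  induction L with
  | zero => intro k hk; interval_cases k; rfl
  | succ L ih =>
    intro k hk
    have h1 : 1 ≤ 2 ^ L := Nat.one_le_two_pow
    have hp : (2:Nat) ^ (L+1) = 2 * 2 ^ L := by ring
    have hbit : k = Nat.bit (decide (k % 2 = 1)) (k / 2) := by
      by_cases h : k % 2 = 1 <;> simp [Nat.bit, h] <;> omega
    have hmask : 2 ^ (L + 1) - 1 = Nat.bit true (2 ^ L - 1) := by
      simp only [Nat.bit, cond_true]
      omega
    rw [hmask]
    conv_lhs => rw [hbit]
    rw [Nat.xor_bit, ih (k / 2) (by omega)]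
    have hk2 : k / 2 ≤ 2 ^ L - 1 := by omega
    by_cases h : k % 2 = 1 <;> simp only [h, decide_true, decide_false, Bool.true_bne, Bool.bne_true, Nat.bit, cond_true, cond_false, Bool.not_true, Bool.not_false] <;> omega

lemma pyDecimal_eq (m : Nat) : pyDecimal (m : Int) = (PD m : Int) := by
  have := pyDecimalLoop_eq m 0 0
  simpa [pyDecimal] using this
lemma pyBinary_eq (m : Nat) : pyBinary (m : Int) = PB m := by
  have := pyBinaryLoop_eq m 0 0
  simpa [pyBinary] using this

-- ===== VERDICT (by name: the statement is the Claim_ definition above) =====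
theorem complement_binary_spec : Claim_equal_complement_binary := by
  intro n _hdom hpre
  unfold Spec_complement_binary
  have hpre' : (0:Int) ≤ n := hpre
  lift n to ℕ using hpre' with m
  simp only [complement_binary]
  rw [pyDecimal_eq, toChars_eq_rep, PySem.List.foldl_append_singleton_eq_map, List.nil_append]
  rw [pyIntOfDigits_eq_VN _ (flip_mem _), pyBinary_eq]
  by_cases hm : m = 0
  · subst hm
    have e0 : PD 0 = 0 := by rw [PD]; simp
    have er : rep 0 = ['0'] := by rw [rep, if_pos (by norm_num : (0:Nat) < 10)]; decide
    rw [e0, er]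
    have e5 : List.map (fun c => if c = '1' then '0' else '1') ['0'] = ['1'] := by decide
    rw [e5]
    have e4 : VN ['1'] 0 = 1 := by decide
    rw [e4]
    have e3 : PB 0 = 0 := by rw [PB]; simp
    have e1 : PB 1 = 1 := by rw [PB]; norm_num [e3]
    rw [e1]
    simp [complement_binary_alt]
  · rw [key m (by omega)]
    have hlt : m < 2 ^ PySem.Int.bitLength (m : Int) := by
      have := PySem.Int.lt_two_pow_bitLength (m : Int)
      simpa using this
    rw [complement_binary_alt, if_neg (by exact_mod_cast hm)]
    have hsh : ((1 <<< PySem.Int.bitLength (m : Int) : Int)) = 2 ^ PySem.Int.bitLength (m : Int) := by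
      simp [Int.shiftLeft_eq]
    rw [hsh]
    have hpos : (0:Int) < 2 ^ PySem.Int.bitLength (m : Int) := pow_pos (by norm_num) _
    have hc : ((2 ^ PySem.Int.bitLength (m : Int) : Nat) : Int) = 2 ^ PySem.Int.bitLength (m : Int) := by
      push_cast; rfl
    rw [PySem.Int.bxor_of_nonneg (by omega) (by positivity)]
    have ht : ((2 ^ PySem.Int.bitLength (m : Int) - 1 : Int)).toNat = 2 ^ PySem.Int.bitLength (m : Int) - 1 := by
      omega
    rw [ht, Int.toNat_natCast, mask_xor _ m hlt]
    have h1 : (1:Nat) ≤ 2 ^ PySem.Int.bitLength (m : Int) := Nat.one_le_two_pow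
    push_cast [Nat.cast_sub (by omega : m ≤ 2 ^ PySem.Int.bitLength (m : Int) - 1), Nat.cast_sub h1]
    ring
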